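-- pv_equiv track=rewrite | github.com/mindu2kk/CodePTIT-Python | test.py | sodep
-- ===== SOURCE A (Python) =====
-- def sodep(n):
--     if n[0] == n[1]:
--         return "NO"
--     for i in range(0,len(n)-2):
--         if i % 2 == 0 and n[i] != n[i+2]:
--             return "NO"
--         if i % 2 == 1 and n[i] != n[i+2]:
--             return "NO"
--     return "YES"
-- ===== SOURCE B (Python) =====
-- def sodep(n):
--     if n[0] == n[1]:
--         return "NO"
--     return "YES" if n[2:] == n[:-2] else "NO"
-- ===== Notes on version B (the rewrite author's own statement) =====
-- stated objective: simpler
-- what changed: A scans indices with a loop comparing n[i] to n[i+2] under two parity branches; B performs no index loop at all: it compares the string shifted by two against itself (n[2:] == n[:-2]), which holds exactly when the string is 2-periodic.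
import Mathlib
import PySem

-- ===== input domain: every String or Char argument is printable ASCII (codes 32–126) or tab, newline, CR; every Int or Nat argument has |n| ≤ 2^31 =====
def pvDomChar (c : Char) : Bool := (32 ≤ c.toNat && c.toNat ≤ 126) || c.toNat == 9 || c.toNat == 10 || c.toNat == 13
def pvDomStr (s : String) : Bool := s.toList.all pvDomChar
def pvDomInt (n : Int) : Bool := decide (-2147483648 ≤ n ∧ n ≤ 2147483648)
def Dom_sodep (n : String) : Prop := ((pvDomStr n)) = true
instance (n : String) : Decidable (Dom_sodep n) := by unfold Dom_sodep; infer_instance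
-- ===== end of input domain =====

-- B replaces A's index loop over (i, i+2) pairs by a single shift comparison
-- n[2:] == n[:-2], which holds exactly when the string is 2-periodic; objective: simpler.

-- ===== PORT A =====
-- the for-loop with its two early-return branches, one list element per iteration
def sodepLoop (n : String) : List Int → String
  | [] => "YES"
  | i :: rest =>
      if PySem.Int.mod i 2 = 0 ∧ ¬ (PySem.Str.pyGet? n i = PySem.Str.pyGet? n (i + 2)) then "NO"
      else if PySem.Int.mod i 2 = 1 ∧ ¬ (PySem.Str.pyGet? n i = PySem.Str.pyGet? n (i + 2)) then "NO"
      else sodepLoop n rest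

def sodep (n : String) : String :=
  if PySem.Str.pyGet? n 0 = PySem.Str.pyGet? n 1 then "NO"
  else sodepLoop n (PySem.List.pyRange 0 (PySem.Str.len n - 2) 1)

-- ===== PORT B =====
def sodep_alt (n : String) : String :=
  if PySem.Str.pyGet? n 0 = PySem.Str.pyGet? n 1 then "NO"
  else if PySem.Str.slice n (some 2) none = PySem.Str.slice n none (some (-2)) then "YES" else "NO"

-- ===== PRECONDITION & SPEC =====
-- Python A raises IndexError (n[1]) on strings of length < 2; excluded.
def Pre_sodep (n : String) : Prop := 2 ≤ PySem.Str.len n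
instance (n : String) : Decidable (Pre_sodep n) := by unfold Pre_sodep; infer_instance
def pvWitness_sodep : String := "ab"
def Spec_sodep (n : String) (out : String) : Prop := out = sodep_alt n
instance (n : String) (out : String) : Decidable (Spec_sodep n out) := by unfold Spec_sodep; infer_instance

-- ===== CLAIM (what is proved, stated in full; the proofs are below) =====
def Claim_equal_sodep : Prop := ∀ (n : String), Dom_sodep n → Pre_sodep n → Spec_sodep n (sodep n)

-- ===== LEMMAS AND PROOFS =====

lemma sodepLoop_eq (n : String) (l : List Int) :
    sodepLoop n l =
      if l.all (fun i => decide (PySem.Str.pyGet? n i = PySem.Str.pyGet? n (i + 2)))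
      then "YES" else "NO" := by
  induction l with
  | nil => simp [sodepLoop]
  | cons i rest ih =>
      have h0 : 0 ≤ PySem.Int.mod i 2 := PySem.Int.mod_nonneg i (by norm_num)
      have h2 : PySem.Int.mod i 2 < 2 := PySem.Int.mod_lt i (by norm_num)
      by_cases hg : PySem.Str.pyGet? n i = PySem.Str.pyGet? n (i + 2)
      · rw [sodepLoop, if_neg (fun h => h.2 hg), if_neg (fun h => h.2 hg), ih,
          List.all_cons, decide_eq_true hg, Bool.true_and]
      · have hm : PySem.Int.mod i 2 = 0 ∨ PySem.Int.mod i 2 = 1 := by omega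
        have hr : (i :: rest).all
            (fun i => decide (PySem.Str.pyGet? n i = PySem.Str.pyGet? n (i + 2))) = false := by
          rw [List.all_cons, decide_eq_false hg, Bool.false_and]
        rw [hr]
        rcases hm with hm | hm
        · rw [sodepLoop, if_pos ⟨hm, hg⟩]
          simp
        · rw [sodepLoop, if_neg (fun h => by rw [hm] at h; exact absurd h.1 (by norm_num)),
            if_pos ⟨hm, hg⟩]
          simp

lemma all_range_A_iff (n : String) :
    ((PySem.List.pyRange 0 (PySem.Str.len n - 2) 1).all
        (fun i => decide (PySem.Str.pyGet? n i = PySem.Str.pyGet? n (i + 2))) = true) ↔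
    (∀ k : Nat, k + 2 < n.toList.length → n.toList[k]? = n.toList[k + 2]?) := by
  rw [List.all_eq_true]
  constructor
  · intro h k hk
    have hmem : (k : Int) ∈ PySem.List.pyRange 0 (PySem.Str.len n - 2) 1 := by
      rw [PySem.List.mem_pyRange_one, PySem.Str.len_eq]
      omega
    have := h _ hmem
    rw [decide_eq_true_iff] at this
    have e2 : ((k : Int) + 2) = ((k + 2 : Nat) : Int) := by push_cast; ring
    rw [e2, PySem.Str.pyGet?_natCast, PySem.Str.pyGet?_natCast] at this
    exact this
  · intro h i hmem
    rw [PySem.List.mem_pyRange_one, PySem.Str.len_eq] at hmem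
    rw [decide_eq_true_iff]
    have hi : i = ((i.toNat : Nat) : Int) := by omega
    have hi2 : i + 2 = ((i.toNat + 2 : Nat) : Int) := by omega
    rw [hi2, hi, PySem.Str.pyGet?_natCast, PySem.Str.pyGet?_natCast]
    exact h i.toNat (by omega)

-- the shift equality cs.drop 2 = cs.take (len - 2) is exactly the i/i+2 chain condition
lemma drop_two_eq_take_iff (cs : List Char) :
    (cs.drop 2 = cs.take (cs.length - 2)) ↔
    (∀ k : Nat, k + 2 < cs.length → cs[k]? = cs[k + 2]?) := by
  constructor
  · intro h k hk
    have := congrArg (fun l => l[k]?) h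
    simp only [List.getElem?_drop, List.getElem?_take] at this
    rw [if_pos (by omega)] at this
    rw [Nat.add_comm k 2, this]
  · intro h
    apply List.ext_getElem?
    intro k
    simp only [List.getElem?_drop, List.getElem?_take]
    by_cases hk : k < cs.length - 2
    · rw [if_pos hk, Nat.add_comm 2 k, ← h k (by omega)]
    · rw [if_neg hk, List.getElem?_eq_none (by omega)]

lemma slice_B_iff (n : String) :
    (PySem.Str.slice n (some 2) none = PySem.Str.slice n none (some (-2))) ↔
    (∀ k : Nat, k + 2 < n.toList.length → n.toList[k]? = n.toList[k + 2]?) := by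
  rw [← drop_two_eq_take_iff]
  constructor
  · intro h
    have := congrArg String.toList h
    simp only [PySem.Str.toList_slice, PySem.Chars.slice_eq_listSlice] at this
    rw [PySem.List.slice_from _ (by norm_num : (0:Int) ≤ 2)] at this
    rw [show ((2:Int)).toNat = 2 from rfl] at this
    rw [PySem.List.slice_to_neg_ofNat _ 2 (by norm_num)] at this
    exact this
  · intro h
    have e1 : (PySem.Str.slice n (some 2) none).toList = n.toList.drop 2 := by
      simp only [PySem.Str.toList_slice, PySem.Chars.slice_eq_listSlice]
      rw [PySem.List.slice_from _ (by norm_num : (0:Int) ≤ 2)]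
      rfl
    have e2 : (PySem.Str.slice n none (some (-2))).toList = n.toList.take (n.toList.length - 2) := by
      simp only [PySem.Str.toList_slice, PySem.Chars.slice_eq_listSlice]
      rw [PySem.List.slice_to_neg_ofNat _ 2 (by norm_num)]
    have : (PySem.Str.slice n (some 2) none).toList = (PySem.Str.slice n none (some (-2))).toList := by
      rw [e1, e2, h]
    exact String.toList_injective this

-- ===== VERDICT (by name: the statement is the Claim_ definition above) =====
theorem sodep_spec : Claim_equal_sodep := by
  intro n _ _
  unfold Spec_sodep sodep sodep_alt
  by_cases h01 : PySem.Str.pyGet? n 0 = PySem.Str.pyGet? n 1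
  · rw [if_pos h01, if_pos h01]
  · rw [if_neg h01, if_neg h01, sodepLoop_eq]
    by_cases hA : (PySem.List.pyRange 0 (PySem.Str.len n - 2) 1).all
        (fun i => decide (PySem.Str.pyGet? n i = PySem.Str.pyGet? n (i + 2))) = true
    · rw [if_pos hA, if_pos ((slice_B_iff n).mpr ((all_range_A_iff n).mp hA))]
    · rw [if_neg hA, if_neg (fun hB => hA ((all_range_A_iff n).mpr ((slice_B_iff n).mp hB)))]
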